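-- pv_equiv track=rewrite | github.com/tarungattu/JobShopGA | paper_prog.py | create_operation_data
-- ===== SOURCE A (Python) =====
-- def create_operation_data(machine_data, ptime_data, m):
--     matrix = []
--     sublist = []
--     for i in range(len(machine_data)):
--         sublist.append([machine_data[i], ptime_data[i]])
--         if (i + 1) % m == 0:
--             matrix.append(sublist)
--             sublist = []
--     # Check if there are remaining elements
--     if sublist:
--         matrix.append(sublist)
--     return matrix
-- ===== SOURCE B (Python) =====
-- def create_operation_data(machine_data, ptime_data, m):
--     pairs = [[a, ptime_data[i]] for i, a in enumerate(machine_data)]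
--     if not pairs:
--         return []
--     return [pairs[i:i + m] for i in range(0, len(pairs), m)]
-- ===== Notes on version B (the rewrite author's own statement) =====
-- stated objective: simpler
-- what changed: A's single loop with a running sublist flushed on a modulo test is replaced by a two-phase build-then-slice: build the flat pairs list once, then chunk it with list slicing over a stepped range. Pre_ excludes inputs where A raises (ptime_data shorter than machine_data; m == 0 with nonempty data) and nonempty data with negative m, where A's grouping into chunks of |m| is an accident of Python's divisor-sign modulo while B's empty stepped range yields [].
-- outside the precondition, e.g. on create_operation_data([1, 2], [3, 4], -2): A returns [[[1, 3], [2, 4]]], B returns []; on create_operation_data([1], [2], 0): A raises ZeroDivisionError, B raises ValueError; on create_operation_data([1, 2], [5], 3): A raises IndexError, B raises IndexError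
import Mathlib
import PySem

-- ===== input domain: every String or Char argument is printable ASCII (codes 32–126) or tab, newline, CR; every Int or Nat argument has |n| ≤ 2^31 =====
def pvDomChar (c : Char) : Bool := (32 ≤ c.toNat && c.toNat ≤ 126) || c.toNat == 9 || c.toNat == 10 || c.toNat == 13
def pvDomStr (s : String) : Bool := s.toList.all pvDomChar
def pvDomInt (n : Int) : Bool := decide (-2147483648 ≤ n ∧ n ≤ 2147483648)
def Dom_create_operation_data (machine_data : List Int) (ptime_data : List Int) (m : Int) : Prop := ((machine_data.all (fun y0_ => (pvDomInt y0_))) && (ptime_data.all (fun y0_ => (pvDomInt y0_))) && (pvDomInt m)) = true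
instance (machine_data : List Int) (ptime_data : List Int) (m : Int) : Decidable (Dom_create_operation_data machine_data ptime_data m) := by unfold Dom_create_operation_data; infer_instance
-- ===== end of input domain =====

-- B replaces A's running-sublist-with-modulo-flush loop by a two-phase build-then-slice (simpler decomposition; same cost).

-- ===== PORT A =====
def create_operation_data (machine_data : List Int) (ptime_data : List Int) (m : Int) : List (List (List Int)) :=
  let st := (PySem.List.pyRange 0 (machine_data.length : Int) 1).foldl
    (fun (st : List (List (List Int)) × List (List Int)) i =>
      let sub := st.2 ++ [[PySem.List.pyGetD machine_data i 0, PySem.List.pyGetD ptime_data i 0]]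
      if PySem.Int.mod (i + 1) m = 0 then (st.1 ++ [sub], []) else (st.1, sub))
    ([], [])
  if st.2 ≠ [] then st.1 ++ [st.2] else st.1

-- ===== PORT B =====
def create_operation_data_alt (machine_data : List Int) (ptime_data : List Int) (m : Int) : List (List (List Int)) :=
  let pairs := (PySem.List.enumerate machine_data).map (fun e => [e.2, PySem.List.pyGetD ptime_data e.1 0])
  if pairs = [] then []
  else (PySem.List.pyRange 0 (pairs.length : Int) m).map
    (fun i => PySem.List.slice pairs (some i) (some (i + m)))

-- ===== PRECONDITION & SPEC =====
-- Pre_ excludes inputs where A raises (ptime_data shorter than machine_data → IndexError; m = 0 with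
-- nonempty data → ZeroDivisionError) and nonempty data with negative m, a defensible corner where A's
-- grouping into chunks of |m| is an accident of Python's divisor-sign modulo and B's empty stepped range gives [].
def Pre_create_operation_data (machine_data : List Int) (ptime_data : List Int) (m : Int) : Prop :=
  machine_data.length ≤ ptime_data.length ∧ (machine_data = [] ∨ 0 < m)
instance (machine_data : List Int) (ptime_data : List Int) (m : Int) : Decidable (Pre_create_operation_data machine_data ptime_data m) := by unfold Pre_create_operation_data; infer_instance

def pvWitness_create_operation_data : List Int × List Int × Int := ([1, 2, 3], [4, 5, 6], 2)

def Spec_create_operation_data (machine_data : List Int) (ptime_data : List Int) (m : Int) (out : List (List (List Int))) : Prop := out = create_operation_data_alt machine_data ptime_data m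
instance (machine_data : List Int) (ptime_data : List Int) (m : Int) (out : List (List (List Int))) : Decidable (Spec_create_operation_data machine_data ptime_data m out) := by unfold Spec_create_operation_data; infer_instance

-- ===== CLAIM (what is proved, stated in full; the proofs are below) =====
def Claim_equal_create_operation_data : Prop := ∀ (machine_data : List Int) (ptime_data : List Int) (m : Int), Dom_create_operation_data machine_data ptime_data m → Pre_create_operation_data machine_data ptime_data m → Spec_create_operation_data machine_data ptime_data m (create_operation_data machine_data ptime_data m)

-- ===== LEMMAS AND PROOFS =====

-- the flat pairs list both programs are built from
def pvPairs (machine_data : List Int) (ptime_data : List Int) : List (List Int) :=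
  (PySem.List.enumerate machine_data).map (fun e => [e.2, PySem.List.pyGetD ptime_data e.1 0])

-- chunks of size k+1
def pvChunk1 {α : Type} (k : Nat) : List α → List (List α)
  | [] => []
  | x :: xs => (x :: xs.take k) :: pvChunk1 k (xs.drop k)
  termination_by l => l.length
  decreasing_by simp only [List.length_cons, List.length_drop]; omega

-- A's loop shape: c slots left in the current sublist sub, full chunks of size k afterwards
def pvChunkW {α : Type} (k : Nat) : Nat → List α → List α → List (List α)
  | _, sub, [] => if sub = [] then [] else [sub]
  | c, sub, x :: xs => if c = 1 then (sub ++ [x]) :: pvChunkW k k [] xs else pvChunkW k (c - 1) (sub ++ [x]) xs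

theorem pvChunkW_eq {α : Type} (k : Nat) (hk : 1 ≤ k) :
    ∀ (xs : List α) (c : Nat) (sub : List α), 1 ≤ c →
      pvChunkW k c sub xs =
        if xs = [] then (if sub = [] then [] else [sub])
        else (sub ++ xs.take c) :: pvChunk1 (k - 1) (xs.drop c) := by
  intro xs
  induction xs with
  | nil => intro c sub _; simp [pvChunkW]
  | cons x rest ih =>
    intro c sub hc
    by_cases h1 : c = 1
    · subst h1
      have hrest := ih k [] hk
      simp only [pvChunkW, List.take_succ_cons, List.take_zero, List.drop_succ_cons,
        List.drop_zero, reduceIte, hrest]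
      rcases rest with _ | ⟨y, t⟩
      · simp [pvChunk1]
      · have hk' : k = (k - 1) + 1 := by omega
        simp only [List.nil_append]
        conv_rhs => rw [pvChunk1]
        rw [hk']
        simp
    · have hc2 : 2 ≤ c := by omega
      have := ih (c - 1) (sub ++ [x]) (by omega)
      simp only [pvChunkW, if_neg h1, this]
      rcases rest with _ | ⟨y, t⟩
      · have ht : List.take c [x] = [x] := List.take_of_length_le (by simp; omega)
        have hd : List.drop c [x] = ([] : List α) := List.drop_of_length_le (by simp; omega)
        simp [ht, hd, pvChunk1.eq_def]
      · have : c = (c - 1) + 1 := by omega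
        rw [this]
        simp

-- range with a positive step, peeled one element
theorem pvRange_pos_cons (a b s : Int) (hs : 0 < s) (h : a < b) :
    PySem.List.pyRange a b s = a :: PySem.List.pyRange (a + s) b s := by
  rw [PySem.List.pyRange_of_pos _ _ hs, PySem.List.pyRange_of_pos _ _ hs]
  have hs0 : s ≠ 0 := by omega
  have hdiv : (b - a + s - 1) / s = (b - a - 1) / s + 1 := by
    have : b - a + s - 1 = (b - a - 1) + 1 * s := by ring
    rw [this, Int.add_mul_ediv_right _ _ hs0]
  have h0 : 0 ≤ (b - a - 1) / s := Int.ediv_nonneg (by omega) (le_of_lt hs)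
  have hcnt : ((b - a + s - 1) / s).toNat = ((b - a - 1) / s).toNat + 1 := by
    rw [hdiv]; omega
  have hcnt2 : (if a + s < b then ((b - (a + s) + s - 1) / s).toNat else 0) = ((b - a - 1) / s).toNat := by
    by_cases hb : a + s < b
    · rw [if_pos hb]
      congr 2
      ring_nf
    · rw [if_neg hb]
      have : (b - a - 1) / s = 0 := Int.ediv_eq_zero_of_lt (by omega) (by omega)
      rw [this]; rfl
  rw [if_pos h, hcnt, hcnt2, List.range_succ_eq_map, List.map_cons, List.map_map]
  congr 1
  · simp
  · apply List.map_congr_left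
    intro k _
    simp only [Function.comp_apply]
    push_cast
    ring

theorem pvRange_pos_nil (a b s : Int) (hs : 0 < s) (h : b ≤ a) :
    PySem.List.pyRange a b s = [] := by
  rw [PySem.List.pyRange_of_pos _ _ hs, if_neg (by omega)]
  rfl

theorem pvPairs_length (md pd : List Int) : (pvPairs md pd).length = md.length := by
  simp [pvPairs, PySem.List.length_enumerate]

theorem pvPairs_getElem? (md pd : List Int) (j : Nat) :
    (pvPairs md pd)[j]? = md[j]?.map (fun x => [x, PySem.List.pyGetD pd (j : Int) 0]) := by
  simp only [pvPairs, List.getElem?_map, PySem.List.getElem?_enumerate, Option.map_map]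
  cases md[j]? <;> simp

-- B's slice comprehension computes the chunks
theorem pvB_chunks (ps : List (List Int)) (m : Int) (hm : 0 < m) :
    ∀ (N : Nat) (xs : List (List Int)) (a : Int), xs.length ≤ N → 0 ≤ a → ps.drop a.toNat = xs →
      (PySem.List.pyRange a (a + xs.length) m).map
          (fun i => PySem.List.slice ps (some i) (some (i + m))) =
        pvChunk1 (m.toNat - 1) xs := by
  intro N
  induction N with
  | zero =>
    intro xs a hN _ _
    have : xs = [] := List.length_eq_zero_iff.mp (by omega)
    subst this
    rw [show a + (([] : List (List Int)).length : Int) = a by simp,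
      pvRange_pos_nil a a m hm le_rfl]
    simp [pvChunk1]
  | succ N ih =>
    intro xs a hN ha hdrop
    rcases xs with _ | ⟨x, t⟩
    · rw [show a + (([] : List (List Int)).length : Int) = a by simp,
        pvRange_pos_nil a a m hm le_rfl]
      simp [pvChunk1]
    · have hlen : (0:Int) < ((x :: t).length : Int) := by
        simp only [List.length_cons]; positivity
      rw [pvRange_pos_cons a _ m hm (by omega), List.map_cons]
      have hk1 : m.toNat = (m.toNat - 1) + 1 := by omega
      have hhead : PySem.List.slice ps (some a) (some (a + m)) = (x :: t).take m.toNat := by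
        rw [PySem.List.slice_toNat ps ha (by omega)]
        have : (a + m).toNat - a.toNat = m.toNat := by omega
        rw [this, hdrop]
      have hchunk : pvChunk1 (m.toNat - 1) (x :: t) =
          ((x :: t).take m.toNat) :: pvChunk1 (m.toNat - 1) ((x :: t).drop m.toNat) := by
        conv_lhs => rw [pvChunk1]
        rw [hk1]
        simp
      rw [hchunk, hhead]
      congr 1
      by_cases hsm : (x :: t).length ≤ m.toNat
      · have h1 : (x :: t).drop m.toNat = [] := List.drop_eq_nil_iff.mpr (by omega)
        rw [h1]
        have : a + ((x :: t).length : Int) ≤ a + m := by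
          have := hsm; omega
        rw [pvRange_pos_nil _ _ _ hm this]
        simp [pvChunk1]
      · have hlt : m.toNat < (x :: t).length := by omega
        have hd' : ps.drop (a + m).toNat = (x :: t).drop m.toNat := by
          have h2 : (a + m).toNat = m.toNat + a.toNat := by omega
          conv_rhs => rw [← hdrop, List.drop_drop]
          rw [h2]
          congr 1
          omega
        have hlen' : ((x :: t).drop m.toNat).length ≤ N := by
          rw [List.length_drop]; omega
        have := ih ((x :: t).drop m.toNat) (a + m) hlen' (by omega) hd'
        have harith : a + ((x :: t).length : Int) = a + m + (((x :: t).drop m.toNat).length : Int) := by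
          rw [List.length_drop]
          omega
        rw [harith]
        exact this

theorem pv_mod_flush (j k : Nat) (hk : 0 < k) : ((j + 1) % k = 0) ↔ (j % k = k - 1) := by
  rcases Nat.lt_or_ge 1 k with h2 | h2
  · have h1 : 1 % k = 1 := Nat.mod_eq_of_lt h2
    have hjk := Nat.mod_lt j hk
    rw [Nat.add_mod, h1]
    by_cases he : j % k = k - 1
    · rw [he]
      have : k - 1 + 1 = k := by omega
      rw [this, Nat.mod_self]
      simp
    · have : (j % k + 1) % k = j % k + 1 := Nat.mod_eq_of_lt (by omega)
      rw [this]
      constructor <;> intro h <;> omega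
  · have : k = 1 := by omega
    subst this
    simp

-- the Python modulo test, on casts
theorem pv_mod_cast (j k : Nat) (hk : 0 < k) :
    (PySem.Int.mod ((j : Int) + 1) (k : Int) = 0) ↔ ((j + 1) % k = 0) := by
  have hnn : (0 : Int) ≤ (k : Int) := by positivity
  simp only [PySem.Int.mod]
  rw [Int.fmod_eq_emod, if_pos (Or.inl hnn), add_zero]
  have : ((j : Int) + 1) % (k : Int) = (((j + 1) % k : Nat) : Int) := by
    rfl
  rw [this]
  omega

-- A's fold over the remaining indices, with c = k - j % k slots left in the running sublist
theorem pvA_fold (md pd : List Int) (k : Nat) (hk : 0 < k) :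
    ∀ (rest : List (List Int)) (j : Nat) (acc : List (List (List Int))) (sub : List (List Int)),
      rest = (pvPairs md pd).drop j →
      (let st := (PySem.List.pyRange (j : Int) (md.length : Int) 1).foldl
          (fun (st : List (List (List Int)) × List (List Int)) i =>
            let s := st.2 ++ [[PySem.List.pyGetD md i 0, PySem.List.pyGetD pd i 0]]
            if PySem.Int.mod (i + 1) (k : Int) = 0 then (st.1 ++ [s], []) else (st.1, s))
          (acc, sub)
        if st.2 ≠ [] then st.1 ++ [st.2] else st.1) =
        acc ++ pvChunkW k (k - j % k) sub rest := by
  intro rest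
  induction rest with
  | nil =>
    intro j acc sub hrest
    have hj : (pvPairs md pd).length ≤ j := by
      by_contra h
      have := List.drop_eq_nil_iff.mp hrest.symm
      omega
    rw [pvPairs_length] at hj
    rw [pvRange_pos_nil _ _ _ (by omega) (by omega)]
    simp only [List.foldl_nil, pvChunkW]
    by_cases hs : sub = []
    · simp [hs]
    · simp [hs]
  | cons p rest' ih =>
    intro j acc sub hrest
    have hj : j < (pvPairs md pd).length := by
      by_contra h
      rw [List.drop_eq_nil_iff.mpr (by omega)] at hrest
      exact List.cons_ne_nil _ _ hrest
    have hdrop := List.drop_eq_getElem_cons hj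
    rw [hdrop] at hrest
    have hp : p = (pvPairs md pd)[j] := (List.cons.injEq _ _ _ _ ▸ hrest).1
    have hrest' : rest' = (pvPairs md pd).drop (j + 1) := (List.cons.injEq _ _ _ _ ▸ hrest).2
    have hjm : j < md.length := by rw [pvPairs_length] at hj; omega
    have hpv : p = [md[j], PySem.List.pyGetD pd (j : Int) 0] := by
      have h1 : (pvPairs md pd)[j]? = some p := by rw [List.getElem?_eq_getElem hj, hp]
      rw [pvPairs_getElem?, List.getElem?_eq_getElem hjm] at h1
      simpa using h1.symm
    have hmd : PySem.List.pyGetD md (j : Int) 0 = md[j] := by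
      rw [PySem.List.pyGetD_natCast, List.getD_eq_getElem?_getD, List.getElem?_eq_getElem hjm]
      rfl
    rw [pvRange_pos_cons _ _ _ (by omega) (by exact_mod_cast hjm), List.foldl_cons]
    simp only [hmd, ← hpv]
    by_cases hflush : PySem.Int.mod ((j : Int) + 1) (k : Int) = 0
    · rw [if_pos hflush]
      have hje : (j + 1) % k = 0 := (pv_mod_cast j k hk).mp hflush
      have hjk : j % k = k - 1 := (pv_mod_flush j k hk).mp hje
      have hcast : ((j : Int) + 1) = ((j + 1 : Nat) : Int) := by push_cast; ring
      rw [hcast]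
      rw [ih (j + 1) (acc ++ [sub ++ [p]]) [] hrest']
      rw [hje]
      have hc1 : k - j % k = 1 := by omega
      rw [hc1]
      simp only [pvChunkW, Nat.sub_zero]
      rw [List.append_assoc]
      rfl
    · rw [if_neg hflush]
      have hje : (j + 1) % k ≠ 0 := fun h => hflush ((pv_mod_cast j k hk).mpr h)
      have hjk : j % k ≠ k - 1 := fun h => hje ((pv_mod_flush j k hk).mpr h)
      have hcast : ((j : Int) + 1) = ((j + 1 : Nat) : Int) := by push_cast; ring
      rw [hcast]
      rw [ih (j + 1) acc (sub ++ [p]) hrest']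
      have hjlt := Nat.mod_lt j hk
      have hstep : (j + 1) % k = j % k + 1 := by
        rcases Nat.lt_or_ge 1 k with h2 | h2
        · rw [Nat.add_mod, Nat.mod_eq_of_lt h2, Nat.mod_eq_of_lt (by omega)]
        · interval_cases k
          omega
      have hc : k - j % k = (k - (j + 1) % k) + 1 := by rw [hstep]; omega
      rw [hc]
      simp only [pvChunkW, Nat.add_sub_cancel]
      have : (k - (j + 1) % k) + 1 = 1 ↔ k - (j + 1) % k = 0 := by omega
      rw [if_neg (by omega)]

-- main equivalence for nonempty data and positive m
theorem pv_main (md pd : List Int) (m : Int) (hm : 0 < m) :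
    create_operation_data md pd m = create_operation_data_alt md pd m := by
  have hk : 0 < m.toNat := by omega
  have hmk : ((m.toNat : Int)) = m := Int.toNat_of_nonneg (by omega)
  have hA := pvA_fold md pd m.toNat hk (pvPairs md pd) 0 [] [] (by simp)
  rw [hmk] at hA
  have hA' : create_operation_data md pd m = [] ++ pvChunkW m.toNat (m.toNat - 0 % m.toNat) [] (pvPairs md pd) := by
    rw [← hA]
    rfl
  rw [Nat.zero_mod, Nat.sub_zero, List.nil_append] at hA'
  rw [hA', pvChunkW_eq m.toNat hk (pvPairs md pd) m.toNat [] hk]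
  have hBdef : create_operation_data_alt md pd m =
      if pvPairs md pd = [] then []
      else (PySem.List.pyRange 0 ((pvPairs md pd).length : Int) m).map
        (fun i => PySem.List.slice (pvPairs md pd) (some i) (some (i + m))) := rfl
  rw [hBdef]
  rcases hps : pvPairs md pd with _ | ⟨x, t⟩
  · simp
  · rw [if_neg (List.cons_ne_nil x t), if_neg (List.cons_ne_nil x t)]
    have hB := pvB_chunks (x :: t) m hm (x :: t).length (x :: t) 0 le_rfl le_rfl (by simp)
    rw [show (0 : Int) + (((x :: t).length : Nat) : Int) = (((x :: t).length : Nat) : Int) by ring] at hB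
    rw [hB, List.nil_append]
    conv_rhs => rw [pvChunk1]
    have hk1 : m.toNat = (m.toNat - 1) + 1 := by omega
    rw [hk1]
    simp

theorem pv_empty (pd : List Int) (m : Int) :
    create_operation_data [] pd m = create_operation_data_alt [] pd m := by
  unfold create_operation_data create_operation_data_alt
  simp [PySem.List.enumerate]

-- ===== VERDICT (by name: the statement is the Claim_ definition above) =====
theorem create_operation_data_spec : Claim_equal_create_operation_data := by
  intro md pd m _ hpre
  unfold Spec_create_operation_data
  rcases hpre.2 with h | h
  · subst h; exact pv_empty pd m
  · exact (pv_main md pd m h)
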